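-- pv_equiv track=rewrite | github.com/Bloodielie/controllers_api-site | utils/validation.py | validation_bus_stop
-- ===== SOURCE A (Python) =====
-- def validation_bus_stop(data: tuple, stop_bus: list) -> list:
--     """ Поиск остановки в строчке"""
--     temp_data = []
--     for _data in data:
--         dates = _data[0].split()
--         for i in range(len(dates)):
--             for j in range(i, len(dates)):
--                 combination = ' '.join(dates[i:j + 1])
--                 if combination in stop_bus:
--                     temporary_tuple = (combination, _data[1])
--                     temp_data.append(temporary_tuple)
--     return temp_data
-- ===== SOURCE B (Python) =====
-- def validation_bus_stop(data: tuple, stop_bus: list) -> list: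
--     """Trie-like span search: hash-set of stop names plus a set of all string
--     prefixes of the stops, used to prune the forward walk from each start word."""
--     stops = set(stop_bus)
--     prefixes = set()
--     for s in stop_bus:
--         for k in range(len(s) + 1):
--             prefixes.add(s[:k])
--     out = []
--     for text, tag in data:
--         words = text.split()
--         n = len(words)
--         for i in range(n):
--             comb = words[i]
--             j = i + 1
--             while True:
--                 if comb in stops:
--                     out.append((comb, tag))
--                 if j >= n or comb not in prefixes:
--                     break
--                 comb = comb + ' ' + words[j]
--                 j += 1
--     return out
-- ===== Notes on version B (the rewrite author's own statement) =====
-- stated objective: faster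
-- what changed: A enumerates every word span, re-joins it and scans stop_bus for membership (quadratic spans times linear scan); B precomputes a hash-set of the stops and a set of all string prefixes of the stops, then walks forward from each start word, extending the span string incrementally and pruning as soon as the current span is no prefix of any stop.
import Mathlib
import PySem

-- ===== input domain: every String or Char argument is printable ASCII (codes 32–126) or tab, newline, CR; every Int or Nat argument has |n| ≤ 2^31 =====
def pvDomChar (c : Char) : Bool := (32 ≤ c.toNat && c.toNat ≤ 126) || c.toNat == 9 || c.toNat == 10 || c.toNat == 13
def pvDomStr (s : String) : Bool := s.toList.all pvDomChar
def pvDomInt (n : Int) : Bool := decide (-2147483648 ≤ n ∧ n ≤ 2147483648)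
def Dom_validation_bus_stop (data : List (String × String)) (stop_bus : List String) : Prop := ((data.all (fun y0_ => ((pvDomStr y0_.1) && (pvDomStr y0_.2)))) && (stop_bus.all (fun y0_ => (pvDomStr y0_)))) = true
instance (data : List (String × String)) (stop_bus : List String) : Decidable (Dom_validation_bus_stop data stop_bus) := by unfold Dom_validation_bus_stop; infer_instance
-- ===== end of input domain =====

-- B replaces A's slice-join-and-scan over every span by a hash-set of the stops plus a
-- set of all string prefixes of the stops that prunes the forward walk from each start
-- word (objective: faster).

-- ===== PORT A =====
def validation_bus_stop (data : List (String × String)) (stop_bus : List String) : List (String × String) :=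
  data.foldl (fun temp_data _data =>
    let dates := PySem.Str.split₀ _data.1
    (PySem.List.pyRange 0 (dates.length : Int)).foldl (fun acc1 i =>
      (PySem.List.pyRange i (dates.length : Int)).foldl (fun acc2 j =>
        let combination := PySem.Str.join " " (PySem.List.slice dates (some i) (some (j + 1)))
        if stop_bus.contains combination then acc2 ++ [(combination, _data.2)] else acc2)
        acc1)
      temp_data)
    []

-- ===== PORT B =====
-- prefixes = { s[:k] | s in stop_bus, 0 ≤ k ≤ len(s) }
def pvPrefixes (stop_bus : List String) : PySem.Set String :=
  stop_bus.foldl (fun p s =>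
    (PySem.List.pyRange 0 (PySem.Str.len s + 1)).foldl
      (fun p k => p.add (PySem.Str.slice s none (some k))) p)
    PySem.Set.empty

-- the inner `while True` walk of Source B, as structural recursion on the remaining words
def pvWalkB (stops prefixes : PySem.Set String) (tag : String)
    (rest : List String) (comb : String) (out : List (String × String)) :
    List (String × String) :=
  let out' := if stops.contains comb then out ++ [(comb, tag)] else out
  match rest with
  | [] => out'
  | w :: rest' =>
    if prefixes.contains comb then
      pvWalkB stops prefixes tag rest' (PySem.Str.join " " [comb, w]) out'
    else out'

def validation_bus_stop_alt (data : List (String × String)) (stop_bus : List String) : List (String × String) :=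
  let stops : PySem.Set String := PySem.Set.ofList stop_bus
  let prefixes := pvPrefixes stop_bus
  data.foldl (fun out td =>
    let words := PySem.Str.split₀ td.1
    (PySem.List.pyRange 0 (words.length : Int)).foldl (fun out1 i =>
      pvWalkB stops prefixes td.2
        (PySem.List.slice words (some (i + 1)) none)
        (PySem.List.pyGetD words i "")
        out1)
      out)
    []

-- ===== PRECONDITION & SPEC =====
def Spec_validation_bus_stop (data : List (String × String)) (stop_bus : List String) (out : List (String × String)) : Prop := out = validation_bus_stop_alt data stop_bus
instance (data : List (String × String)) (stop_bus : List String) (out : List (String × String)) : Decidable (Spec_validation_bus_stop data stop_bus out) := by unfold Spec_validation_bus_stop; infer_instance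

-- ===== CLAIM (what is proved, stated in full; the proofs are below) =====
def Claim_equal_validation_bus_stop : Prop := ∀ (data : List (String × String)) (stop_bus : List String), Dom_validation_bus_stop data stop_bus → Spec_validation_bus_stop data stop_bus (validation_bus_stop data stop_bus)

-- ===== LEMMAS AND PROOFS =====

-- common specification of what both programs emit for one start word:
-- check comb, then extend comb word by word, checking each extension
def pvEmits (SB : List String) (tag : String) (comb : String) : List String → List (String × String)
  | [] => if SB.contains comb then [(comb, tag)] else []
  | w :: r =>
    (if SB.contains comb then [(comb, tag)] else []) ++
      pvEmits SB tag (PySem.Str.join " " [comb, w]) r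

theorem pvOfList_contains (l : List String) (x : String) :
    (PySem.Set.ofList l).contains x = l.contains x := by
  by_cases h : x ∈ l <;> simp [PySem.Set.mem_ofList, h]

theorem pvMem_foldl_add {ι : Type} (L : List ι) (f : ι → String) (p : PySem.Set String)
    (x : String) :
    x ∈ L.foldl (fun p k => p.add (f k)) p ↔ x ∈ p ∨ ∃ k ∈ L, x = f k := by
  induction L generalizing p with
  | nil => simp
  | cons a L ih =>
    simp only [List.foldl_cons, ih, PySem.Set.mem_add, List.mem_cons]
    constructor
    · rintro (⟨h | h⟩ | ⟨k, hk, rfl⟩)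
      · exact Or.inl h
      · exact Or.inr ⟨a, Or.inl rfl, h⟩
      · exact Or.inr ⟨k, Or.inr hk, rfl⟩
    · rintro (h | ⟨k, (rfl | hk), rfl⟩)
      · exact Or.inl (Or.inl h)
      · exact Or.inl (Or.inr rfl)
      · exact Or.inr ⟨k, hk, rfl⟩

theorem pvMem_prefixes (stop_bus : List String) (c e : String)
    (he : e ∈ stop_bus) (hpre : c.toList <+: e.toList) : c ∈ pvPrefixes stop_bus := by
  have key : ∀ (p : PySem.Set String) (l : List String), e ∈ l →
      c ∈ l.foldl (fun p s =>
        (PySem.List.pyRange 0 (PySem.Str.len s + 1)).foldl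
          (fun p k => p.add (PySem.Str.slice s none (some k))) p) p := by
    intro p l hl
    induction l generalizing p with
    | nil => cases hl
    | cons a l ih =>
      rw [List.foldl_cons]
      rcases List.mem_cons.mp hl with rfl | hl
      · -- c is added in the inner fold over a's prefixes; membership persists
        have hmono : ∀ (q : PySem.Set String) (l' : List String), c ∈ q →
            c ∈ l'.foldl (fun p s =>
              (PySem.List.pyRange 0 (PySem.Str.len s + 1)).foldl
                (fun p k => p.add (PySem.Str.slice s none (some k))) p) q := by
          intro q l' hq
          induction l' generalizing q with
          | nil => exact hq
          | cons b l' ih' =>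
            refine ih' _ ?_
            exact (pvMem_foldl_add _ _ _ _).mpr (Or.inl hq)
        refine hmono _ _ ?_
        refine (pvMem_foldl_add _ _ _ _).mpr (Or.inr ?_)
        refine ⟨(c.toList.length : Int), ?_, ?_⟩
        · rw [PySem.List.mem_pyRange_one]
          have := hpre.length_le
          rw [PySem.Str.len_eq]
          omega
        · apply String.toList_inj.mp
          rw [PySem.Str.toList_slice, PySem.Chars.slice_eq_listSlice,
            PySem.List.slice_to _ (by positivity)]
          rw [Int.toNat_natCast]
          exact (List.prefix_iff_eq_take.mp hpre)
      · exact ih _ hl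
  exact key _ _ he

-- ' '.join(l + [w]) appends ' ' + w when l is nonempty (char level)
theorem pvJoin_snoc_chars (sep q : List Char) :
    ∀ (ps : List (List Char)), ps ≠ [] →
      PySem.Chars.join sep (ps ++ [q]) = PySem.Chars.join sep ps ++ sep ++ q := by
  intro ps
  induction ps with
  | nil => intro h; cases h rfl
  | cons p ps ih =>
    intro _
    cases ps with
    | nil => simp [PySem.Chars.join_cons_cons, PySem.Chars.join_singleton]
    | cons p2 rest =>
      have := ih (by simp)
      simp only [List.cons_append, PySem.Chars.join_cons_cons] at this ⊢
      rw [this]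
      simp [List.append_assoc]

theorem pvJoin_singleton (p : String) : PySem.Str.join " " [p] = p := by
  apply String.toList_inj.mp
  rw [PySem.Str.toList_join]
  simp [PySem.Chars.join_singleton]

theorem pvJoin_pair_toList (a b : String) :
    (PySem.Str.join " " [a, b]).toList = a.toList ++ " ".toList ++ b.toList := by
  rw [PySem.Str.toList_join]
  simp [PySem.Chars.join_cons_cons, PySem.Chars.join_singleton]

theorem pvJoin_snoc (l : List String) (w : String) (h : l ≠ []) :
    PySem.Str.join " " (l ++ [w]) = PySem.Str.join " " [PySem.Str.join " " l, w] := by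
  apply String.toList_inj.mp
  rw [pvJoin_pair_toList, PySem.Str.toList_join, List.map_append]
  simpa using pvJoin_snoc_chars " ".toList w.toList (l.map String.toList) (by simpa using h)

-- once no stop has comb as a string prefix, no extension of comb is ever emitted
theorem pvEmits_dead (SB : List String) (tag : String) (c0 : String)
    (hdead : ∀ e ∈ SB, ¬ (c0.toList <+: e.toList)) :
    ∀ (r : List String) (c : String), c0.toList <+: c.toList → pvEmits SB tag c r = [] := by
  intro r
  induction r with
  | nil =>
    intro c hc
    have : ¬ c ∈ SB := fun hmem => hdead c hmem hc
    simp [pvEmits, List.contains_eq_mem, this]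
  | cons w r ih =>
    intro c hc
    have : ¬ c ∈ SB := fun hmem => hdead c hmem hc
    have hext : c0.toList <+: (PySem.Str.join " " [c, w]).toList := by
      rw [pvJoin_pair_toList]
      exact hc.trans ⟨" ".toList ++ w.toList, by simp⟩
    simp [pvEmits, List.contains_eq_mem, this, ih _ hext]

-- the pruned walk of B computes exactly pvEmits
theorem pvWalkB_eq (SB : List String) (P : PySem.Set String) (tag : String)
    (hcl : ∀ c e, e ∈ SB → c.toList <+: e.toList → c ∈ P) :
    ∀ (r : List String) (comb : String) (acc : List (String × String)),
      pvWalkB (PySem.Set.ofList SB) P tag r comb acc = acc ++ pvEmits SB tag comb r := by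
  intro r
  induction r with
  | nil =>
    intro comb acc
    simp only [pvWalkB, pvEmits, pvOfList_contains]
    split <;> simp
  | cons w r ih =>
    intro comb acc
    simp only [pvWalkB, pvEmits, pvOfList_contains]
    by_cases hp : P.contains comb
    · rw [if_pos hp, ih]
      split <;> simp
    · rw [if_neg hp]
      have hdead : ∀ e ∈ SB, ¬ (comb.toList <+: e.toList) := by
        intro e he hpre
        exact hp ((PySem.Set.contains_iff P comb).mpr (hcl comb e he hpre))
      have hext : comb.toList <+: (PySem.Str.join " " [comb, w]).toList := by
        rw [pvJoin_pair_toList]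
        exact ⟨" ".toList ++ w.toList, by simp⟩
      rw [pvEmits_dead SB tag comb hdead r _ hext]
      split <;> simp

-- A's inner j-loop computes pvEmits of the span built so far
theorem pvA_loop (SB : List String) (tag : String) (ws : List String) :
    ∀ (t i j : Nat), i ≤ j → ws.length = j + 1 + t →
      ∀ acc : List (String × String),
      (PySem.List.pyRange (j : Int) (ws.length : Int)).foldl (fun acc2 jj =>
        let combination := PySem.Str.join " " (PySem.List.slice ws (some (i : Int)) (some (jj + 1)))
        if SB.contains combination then acc2 ++ [(combination, tag)] else acc2) acc
      = acc ++ pvEmits SB tag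
          (PySem.Str.join " " ((ws.drop i).take (j + 1 - i))) (ws.drop (j + 1)) := by
  intro t
  induction t with
  | zero =>
    intro i j hij hlen acc
    rw [PySem.List.pyRange_one_cons (by omega : (j : Int) < (ws.length : Int))]
    have hempty : PySem.List.pyRange ((j : Int) + 1) (ws.length : Int) = [] := by
      have : ∀ x : Int, ¬ x ∈ PySem.List.pyRange ((j : Int) + 1) (ws.length : Int) := by
        intro x hx
        rw [PySem.List.mem_pyRange_one] at hx
        omega
      exact List.eq_nil_iff_forall_not_mem.mpr this
    rw [List.foldl_cons, hempty, List.foldl_nil]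
    have hslice : PySem.List.slice ws (some (i : Int)) (some ((j : Int) + 1))
        = (ws.drop i).take (j + 1 - i) := by
      have : ((j : Int) + 1) = ((j + 1 : Nat) : Int) := by push_cast; ring
      rw [this, PySem.List.slice_natCast]
    have hdrop : ws.drop (j + 1) = [] := List.drop_eq_nil_of_le (by omega)
    simp only [hslice, hdrop, pvEmits]
    split <;> simp
  | succ t ih =>
    intro i j hij hlen acc
    rw [PySem.List.pyRange_one_cons (by omega : (j : Int) < (ws.length : Int)), List.foldl_cons]
    have hjn : j + 1 < ws.length := by omega
    have hcast : ((j : Int) + 1) = (((j + 1 : Nat)) : Int) := by push_cast; ring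
    rw [hcast, ih i (j + 1) (by omega) (by omega)]
    have hslice : PySem.List.slice ws (some (i : Int)) (some ((j + 1 : Nat) : Int))
        = (ws.drop i).take (j + 1 - i) := PySem.List.slice_natCast ws i (j + 1)
    have hdrop1 : ws.drop (j + 1) = ws[j + 1] :: ws.drop (j + 2) :=
      List.drop_eq_getElem_cons hjn
    -- the extended span is the old span with ws[j+1] appended
    have htake : (ws.drop i).take (j + 1 + 1 - i) = (ws.drop i).take (j + 1 - i) ++ [ws[j + 1]] := by
      have hlt : j + 1 - i < (ws.drop i).length := by
        rw [List.length_drop]; omega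
      have h1 : j + 1 + 1 - i = (j + 1 - i) + 1 := by omega
      rw [h1, List.take_succ_eq_append_getElem hlt]
      congr 1
      rw [List.getElem_drop]
      have e : i + (j + 1 - i) = j + 1 := by omega
      simp only [e]
    have hne : (ws.drop i).take (j + 1 - i) ≠ [] := by
      apply List.ne_nil_of_length_pos
      rw [List.length_take, List.length_drop]
      omega
    have hjoin : PySem.Str.join " " ((ws.drop i).take (j + 1 + 1 - i))
        = PySem.Str.join " " [PySem.Str.join " " ((ws.drop i).take (j + 1 - i)), ws[j + 1]] := by
      rw [htake]; exact pvJoin_snoc _ _ hne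
    rw [hjoin, hdrop1]
    simp only [pvEmits, hslice]
    split <;> simp

-- A's per-start-index value
theorem pvA_start (SB : List String) (tag : String) (ws : List String) (m : Nat)
    (hm : m < ws.length) (acc : List (String × String)) :
    (PySem.List.pyRange (m : Int) (ws.length : Int)).foldl (fun acc2 jj =>
      let combination := PySem.Str.join " " (PySem.List.slice ws (some (m : Int)) (some (jj + 1)))
      if SB.contains combination then acc2 ++ [(combination, tag)] else acc2) acc
    = acc ++ pvEmits SB tag (ws.getD m "") (ws.drop (m + 1)) := by
  have h := pvA_loop SB tag ws (ws.length - (m + 1)) m m le_rfl (by omega) acc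
  rw [h]
  congr 2
  have hdrop : ws.drop m = ws[m] :: ws.drop (m + 1) := List.drop_eq_getElem_cons hm
  have : (ws.drop m).take (m + 1 - m) = [ws[m]] := by
    rw [hdrop]
    have : m + 1 - m = 1 := by omega
    rw [this, List.take_succ_cons, List.take_zero]
  rw [this, pvJoin_singleton, List.getD_eq_getElem ws "" hm]

-- ===== VERDICT (by name: the statement is the Claim_ definition above) =====
theorem validation_bus_stop_spec : Claim_equal_validation_bus_stop := by
  intro data stop_bus _
  show validation_bus_stop data stop_bus = validation_bus_stop_alt data stop_bus
  unfold validation_bus_stop validation_bus_stop_alt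
  apply PySem.List.foldl_congr_mem
  intro acc td _
  apply PySem.List.foldl_congr_mem
  intro acc1 i hi
  rw [PySem.List.mem_pyRange_one] at hi
  obtain ⟨m, rfl⟩ : ∃ m : Nat, i = (m : Int) := ⟨i.toNat, by omega⟩
  have hm : m < (PySem.Str.split₀ td.1).length := by exact_mod_cast hi.2
  rw [pvA_start stop_bus td.2 (PySem.Str.split₀ td.1) m hm acc1]
  have hcast : (m : Int) + 1 = ((m + 1 : Nat) : Int) := by push_cast; ring
  rw [hcast, PySem.List.pyGetD_natCast, PySem.List.slice_from _ (by positivity),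
    Int.toNat_natCast]
  rw [pvWalkB_eq stop_bus (pvPrefixes stop_bus) td.2
    (fun c e he hpre => pvMem_prefixes stop_bus c e he hpre)]
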